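-- pv_equiv track=rewrite | github.com/4books/argorithm_python | sort/3. 두 수의 합(O(nlogn)).py | solution
-- ===== SOURCE A (Python) =====
-- def solution(nums, target):
--     answer = []
--     n = len(nums)
--     minN = 1_000_000_000
--     nums.sort()
--     for i in range(1, n):
--         diff = nums[i] - nums[i - 1]
--         minN = min(diff, minN)
--
--     for i in range(1, n):
--         diff = nums[i] - nums[i - 1]
--         if diff == minN:
--             answer.append([nums[i - 1], nums[i]])
--
--     return answer
-- ===== SOURCE B (Python) =====
-- def solution(nums, target):
--     # Single fused pass over adjacent sorted pairs, maintaining the running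
--     # minimum and the answer buffer together (A does two separate index scans).
--     # Note: unlike A, B does not sort `nums` in place (return value is identical).
--     s = sorted(nums)
--     minN = 1_000_000_000
--     answer = []
--     for a, b in zip(s, s[1:]):
--         d = b - a
--         if d < minN:
--             minN = d
--             answer = [[a, b]]
--         elif d == minN:
--             answer.append([a, b])
--     return answer
-- ===== Notes on version B (the rewrite author's own statement) =====
-- stated objective: alternative
-- what changed: A sorts then makes two separate index scans over range(1,n) (one to find the minimum adjacent difference, one to collect the pairs achieving it); B makes a single fused pass over zipped adjacent pairs, carrying the running minimum and a reset-on-new-minimum answer buffer together.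
import Mathlib
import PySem

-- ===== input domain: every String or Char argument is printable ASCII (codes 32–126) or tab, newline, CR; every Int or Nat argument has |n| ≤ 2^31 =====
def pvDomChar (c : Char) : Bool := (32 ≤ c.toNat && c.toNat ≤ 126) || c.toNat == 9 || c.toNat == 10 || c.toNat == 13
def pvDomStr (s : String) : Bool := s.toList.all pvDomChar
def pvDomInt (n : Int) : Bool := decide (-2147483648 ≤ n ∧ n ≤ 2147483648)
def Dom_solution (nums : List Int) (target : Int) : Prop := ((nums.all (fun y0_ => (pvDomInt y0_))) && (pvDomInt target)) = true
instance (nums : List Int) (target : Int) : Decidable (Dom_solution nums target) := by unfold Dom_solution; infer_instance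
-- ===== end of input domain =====

-- B fuses A's two index scans into one pass over zipped adjacent sorted pairs with a
-- reset-on-new-minimum answer buffer; same return value (A additionally sorts `nums`
-- in place, B does not — the claim is about the return value only).

-- ===== PORT A =====
-- `nums.sort()` mutates in place; the return-value port continues with the sorted list.
-- All indices i, i-1 for i in range(1, n) are in range (n = len(nums) is preserved by
-- the sort), so Python never raises; `pyGetD _ _ 0` is exact here.
def solution (nums : List Int) (target : Int) : List (List Int) :=
  let n : Int := (nums.length : Int)
  let s := PySem.List.sorted nums (fun x => x) false
  let minN : Int :=
    (PySem.List.pyRange 1 n 1).foldl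
      (fun minN i =>
        min (PySem.List.pyGetD s i 0 - PySem.List.pyGetD s (i - 1) 0) minN) 1000000000
  (PySem.List.pyRange 1 n 1).foldl
    (fun answer i =>
      if PySem.List.pyGetD s i 0 - PySem.List.pyGetD s (i - 1) 0 = minN then
        answer ++ [[PySem.List.pyGetD s (i - 1) 0, PySem.List.pyGetD s i 0]]
      else answer) []

-- ===== PORT B =====
def solution_alt (nums : List Int) (target : Int) : List (List Int) :=
  let s := PySem.List.sorted nums (fun x => x) false
  let res :=
    (s.zip (PySem.List.slice s (some 1) none)).foldl
      (fun (st : Int × List (List Int)) p =>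
        let d := p.2 - p.1
        if d < st.1 then (d, [[p.1, p.2]])
        else if d = st.1 then (st.1, st.2 ++ [[p.1, p.2]])
        else st)
      ((1000000000 : Int), ([] : List (List Int)))
  res.2

-- ===== PRECONDITION & SPEC =====
def Spec_solution (nums : List Int) (target : Int) (out : List (List Int)) : Prop := out = solution_alt nums target
instance (nums : List Int) (target : Int) (out : List (List Int)) : Decidable (Spec_solution nums target out) := by unfold Spec_solution; infer_instance

-- ===== CLAIM (what is proved, stated in full; the proofs are below) =====
def Claim_equal_solution : Prop := ∀ (nums : List Int) (target : Int), Dom_solution nums target → Spec_solution nums target (solution nums target)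

-- ===== LEMMAS AND PROOFS =====

/-- Running minimum of adjacent differences, seeded with `m`. -/
def pvMinD (l : List (Int × Int)) (m : Int) : Int :=
  l.foldl (fun m p => min (p.2 - p.1) m) m

/-- The pairs whose difference is `m`, as two-element lists. -/
def pvCollect (l : List (Int × Int)) (m : Int) : List (List Int) :=
  (l.filter (fun p => p.2 - p.1 = m)).map (fun p => [p.1, p.2])

lemma pvMinD_cons (p : Int × Int) (t : List (Int × Int)) (m : Int) :
    pvMinD (p :: t) m = pvMinD t (min (p.2 - p.1) m) := rfl

lemma pvMinD_le (l : List (Int × Int)) (m : Int) : pvMinD l m ≤ m := by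
  induction l generalizing m with
  | nil => exact le_refl m
  | cons p t ih =>
    calc pvMinD (p :: t) m = pvMinD t (min (p.2 - p.1) m) := rfl
    _ ≤ min (p.2 - p.1) m := ih _
    _ ≤ m := min_le_right _ _

lemma pvCollect_cons (p : Int × Int) (t : List (Int × Int)) (m : Int) :
    pvCollect (p :: t) m =
      (if p.2 - p.1 = m then [[p.1, p.2]] else []) ++ pvCollect t m := by
  by_cases h : p.2 - p.1 = m <;> simp [pvCollect, h]

/-- A generic fold over `range(1, len(s))` reading `s[i-1]`, `s[i]` is a fold over the
adjacent pairs of `s`. -/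
lemma pvFoldl_range_pairs {β : Type} (g : β → Int → Int → β) (s : List Int) (init : β) :
    (PySem.List.pyRange 1 (s.length : Int) 1).foldl
        (fun b i => g b (PySem.List.pyGetD s (i - 1) 0) (PySem.List.pyGetD s i 0)) init
      = (s.zip s.tail).foldl (fun b p => g b p.1 p.2) init := by
  rw [PySem.List.pyRange_one, List.foldl_map]
  rw [List.foldl_ext _
        (fun (b : β) (k : Nat) => g b (s.getD k 0) (s.getD (k + 1) 0)) init
        (by
          intro b k _
          rw [show (1 + (k : Int)) - 1 = ((k : Nat) : Int) by omega,
              show (1 + (k : Int)) = (((k + 1 : Nat)) : Int) by omega,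
              PySem.List.pyGetD_natCast, PySem.List.pyGetD_natCast]),
      show ((s.length : Int) - 1).toNat = s.length - 1 by omega]
  induction s generalizing init with
  | nil => rfl
  | cons a t ih =>
    cases t with
    | nil => rfl
    | cons b' t' =>
      have hlen : (a :: b' :: t').length - 1 = ((b' :: t').length - 1) + 1 := by simp
      rw [hlen, List.range_succ_eq_map, List.foldl_cons, List.foldl_map]
      rw [List.foldl_ext _
            (fun (b : β) (k : Nat) => g b ((b' :: t').getD k 0) ((b' :: t').getD (k + 1) 0)) _
            (by intro b k _; simp)]
      rw [show (a :: b' :: t').zip (a :: b' :: t').tail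
            = (a, b') :: ((b' :: t').zip (b' :: t').tail) from rfl, List.foldl_cons]
      exact ih (g init a b')

/-- Characterisation of B's fused single pass: starting from seed minimum `m` and
buffer `F`, it ends with the running minimum and exactly the pairs achieving it
(keeping `F` only if the seed minimum is never beaten). -/
lemma pvBfold (l : List (Int × Int)) (m : Int) (F : List (List Int)) :
    l.foldl
        (fun (st : Int × List (List Int)) p =>
          let d := p.2 - p.1
          if d < st.1 then (d, [[p.1, p.2]])
          else if d = st.1 then (st.1, st.2 ++ [[p.1, p.2]])
          else st) (m, F)
      = (pvMinD l m,
          if pvMinD l m = m then F ++ pvCollect l m else pvCollect l (pvMinD l m)) := by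
  induction l generalizing m F with
  | nil => simp [pvMinD, pvCollect]
  | cons p t ih =>
    by_cases h1 : p.2 - p.1 < m
    · conv_lhs => rw [List.foldl_cons]; rw [show
        (let d := p.2 - p.1;
         if d < (m, F).1 then (d, [[p.1, p.2]])
         else if d = (m, F).1 then ((m, F).1, (m, F).2 ++ [[p.1, p.2]])
         else (m, F)) = ((p.2 - p.1 : Int), ([[p.1, p.2]] : List (List Int)))
        from by simp [h1]]
      rw [ih]
      have hM : pvMinD (p :: t) m = pvMinD t (p.2 - p.1) := by
        rw [pvMinD_cons, min_eq_left (le_of_lt h1)]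
      have hle : pvMinD t (p.2 - p.1) ≤ p.2 - p.1 := pvMinD_le _ _
      rw [hM, if_neg (show ¬ pvMinD t (p.2 - p.1) = m by omega), pvCollect_cons]
      by_cases h2 : pvMinD t (p.2 - p.1) = p.2 - p.1
      · rw [if_pos h2, h2, if_pos rfl]
      · rw [if_neg h2, if_neg (show ¬ p.2 - p.1 = pvMinD t (p.2 - p.1) by omega),
            List.nil_append]
    · have hM : pvMinD (p :: t) m = pvMinD t m := by
        rw [pvMinD_cons, min_eq_right (by omega)]
      have hle : pvMinD t m ≤ m := pvMinD_le _ _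
      by_cases h2 : p.2 - p.1 = m
      · conv_lhs => rw [List.foldl_cons]; rw [show
          (let d := p.2 - p.1;
           if d < (m, F).1 then (d, [[p.1, p.2]])
           else if d = (m, F).1 then ((m, F).1, (m, F).2 ++ [[p.1, p.2]])
           else (m, F)) = ((m : Int), F ++ [[p.1, p.2]])
          from by simp [h2]]
        rw [ih, hM, pvCollect_cons, if_pos h2]
        by_cases h3 : pvMinD t m = m
        · rw [if_pos h3, if_pos h3, List.append_assoc]
        · rw [if_neg h3, if_neg h3, pvCollect_cons,
              if_neg (show ¬ p.2 - p.1 = pvMinD t m by omega), List.nil_append]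
      · conv_lhs => rw [List.foldl_cons]; rw [show
          (let d := p.2 - p.1;
           if d < (m, F).1 then (d, [[p.1, p.2]])
           else if d = (m, F).1 then ((m, F).1, (m, F).2 ++ [[p.1, p.2]])
           else (m, F)) = ((m : Int), F)
          from by simp [h1, h2]]
        rw [ih, hM]
        by_cases h3 : pvMinD t m = m
        · rw [if_pos h3, if_pos h3, pvCollect_cons,
              if_neg (show ¬ p.2 - p.1 = m from h2), List.nil_append]
        · rw [if_neg h3, if_neg h3, pvCollect_cons,
              if_neg (show ¬ p.2 - p.1 = pvMinD t m by omega), List.nil_append]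

lemma pvCollect_foldl (l : List (Int × Int)) (m : Int) (acc : List (List Int)) :
    l.foldl (fun b p => if p.2 - p.1 = m then b ++ [[p.1, p.2]] else b) acc
      = acc ++ pvCollect l m := by
  induction l generalizing acc with
  | nil => simp [pvCollect]
  | cons p t ih =>
    rw [List.foldl_cons, pvCollect_cons]
    by_cases h : p.2 - p.1 = m
    · rw [if_pos h, if_pos h, ih, List.append_assoc]
    · rw [if_neg h, if_neg h, ih, List.nil_append]

-- ===== VERDICT (by name: the statement is the Claim_ definition above) =====
theorem solution_spec : Claim_equal_solution := by
  intro nums target _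
  unfold Spec_solution solution solution_alt
  simp only
  set s := PySem.List.sorted nums (fun x => x) false with hs
  have hlen : (nums.length : Int) = (s.length : Int) := by
    rw [hs, PySem.List.length_sorted]
  rw [hlen, PySem.List.slice_from_one]
  rw [pvFoldl_range_pairs (g := fun b x y => min (y - x) b),
      pvFoldl_range_pairs (g := fun (b : List (List Int)) x y =>
        if y - x = (s.zip s.tail).foldl (fun m p => min (p.2 - p.1) m) 1000000000
        then b ++ [[x, y]] else b)]
  rw [pvBfold]
  rw [show List.foldl (fun (m : Int) (q : Int × Int) => min (q.2 - q.1) m) 1000000000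
        (s.zip s.tail) = pvMinD (s.zip s.tail) 1000000000 from rfl,
      pvCollect_foldl, List.nil_append]
  by_cases h : pvMinD (s.zip s.tail) 1000000000 = 1000000000
  · rw [if_pos h, List.nil_append, h]
  · rw [if_neg h]
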